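-- pv_equiv track=rewrite | github.com/BlackChina/fin_savvy_app | fin_savvy_app/budget_recommendations.py | _prior_months
-- ===== SOURCE A (Python) =====
-- def _prior_months(year: int, month: int, count: int) -> list[tuple[int, int]]:
--     y, m = year, month
--     out: list[tuple[int, int]] = []
--     for _ in range(count):
--         m -= 1
--         if m < 1:
--             m = 12
--             y -= 1
--         out.append((y, m))
--     return out
-- ===== SOURCE B (Python) =====
-- def _prior_months(year: int, month: int, count: int) -> list[tuple[int, int]]:
--     base = year * 12 + month - 1
--     out: list[tuple[int, int]] = []
--     for i in range(1, count + 1):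
--         y, r = divmod(base - i, 12)
--         out.append((y, r + 1))
--     return out
-- ===== Notes on version B (the rewrite author's own statement) =====
-- stated objective: simpler
-- what changed: B replaces A's decrement-with-carry loop state (m -= 1; if m < 1: m = 12; y -= 1) by a closed-form index formula, divmod(year*12 + month - 1 - i, 12) for i = 1..count, so no mutable month/year state or carry branch is kept across iterations; Pre_ excludes month > 13, where A emits month numbers above 12 that are not calendar months.
-- intended difference: For month < 1 with count >= 1 A resets any such month straight to December of the previous year (first pair (year-1, 12) no matter how far below 1 month is), while B extends the calendar modularly (e.g. month 0 reads as December of year-1, so its prior month is (year-1, 11)), the arithmetically consistent value on this unspecified corner. — e.g. on _prior_months(2024, 0, 1): A returns [(2023, 12)], B returns [(2023, 11)]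
-- outside the precondition, e.g. on _prior_months(2020, 14, 1): A returns [(2020, 13)], B returns [(2021, 1)]
import Mathlib
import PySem

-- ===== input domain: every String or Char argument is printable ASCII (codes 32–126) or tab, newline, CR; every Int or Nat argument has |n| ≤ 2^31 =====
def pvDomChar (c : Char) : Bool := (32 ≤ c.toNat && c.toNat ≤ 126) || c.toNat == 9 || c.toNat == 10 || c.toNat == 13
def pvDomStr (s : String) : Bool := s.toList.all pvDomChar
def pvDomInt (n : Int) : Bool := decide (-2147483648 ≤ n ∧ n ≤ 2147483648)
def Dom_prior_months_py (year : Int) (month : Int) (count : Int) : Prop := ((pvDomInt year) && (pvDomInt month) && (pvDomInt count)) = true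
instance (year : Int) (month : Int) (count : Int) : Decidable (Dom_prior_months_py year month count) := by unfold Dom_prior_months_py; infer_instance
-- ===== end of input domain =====

-- B lists the prior months by a closed-form divmod index formula instead of A's decrement-with-carry loop (simpler state, same cost).

-- ===== PORT A =====
-- loop 'for _ in range(count)' with mutable y, m, out; count.toNat iterations (range(count) is empty for count ≤ 0)
def priorMonthsLoopA : Nat → Int → Int → List (Int × Int) → List (Int × Int)
  | 0, _, _, out => out
  | Nat.succ n, y, m, out =>
    let m1 := m - 1
    if m1 < 1 then priorMonthsLoopA n (y - 1) 12 (out ++ [(y - 1, 12)])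
    else priorMonthsLoopA n y m1 (out ++ [(y, m1)])

def prior_months_py (year : Int) (month : Int) (count : Int) : List (Int × Int) :=
  priorMonthsLoopA count.toNat year month []

-- ===== PORT B =====
def prior_months_py_alt (year : Int) (month : Int) (count : Int) : List (Int × Int) :=
  let base := year * 12 + month - 1
  (PySem.List.pyRange 1 (count + 1) 1).foldl
    (fun out i =>
      let y := PySem.Int.floordiv (base - i) 12
      let r := PySem.Int.mod (base - i) 12
      out ++ [(y, r + 1)]) []

-- ===== PRECONDITION & SPEC =====
-- Pre_ excludes only month > 13: there A's outputs contain month numbers above 12, which are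
-- not calendar months and which B's calendar arithmetic does not reproduce.
def Pre_prior_months_py (year : Int) (month : Int) (count : Int) : Prop := month ≤ 13
instance (year : Int) (month : Int) (count : Int) : Decidable (Pre_prior_months_py year month count) := by unfold Pre_prior_months_py; infer_instance
def pvWitness_prior_months_py : Int × Int × Int := (2024, 5, 3)

-- For month < 1 with count ≥ 1, A resets any such month straight to December of the previous
-- year (first pair (year-1, 12) regardless of how far below 1 month is), while B extends the
-- calendar modularly (month 0 = December of year-1, so its prior month is (year-1, 11)),
-- the arithmetically consistent value on this unspecified corner.
def D_prior_months_py (year : Int) (month : Int) (count : Int) : Prop := month < 1 ∧ 1 ≤ count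
instance (year : Int) (month : Int) (count : Int) : Decidable (D_prior_months_py year month count) := by unfold D_prior_months_py; infer_instance

def Spec_prior_months_py (year : Int) (month : Int) (count : Int) (out : List (Int × Int)) : Prop := ¬ D_prior_months_py year month count → out = prior_months_py_alt year month count
instance (year : Int) (month : Int) (count : Int) (out : List (Int × Int)) : Decidable (Spec_prior_months_py year month count out) := by unfold Spec_prior_months_py; infer_instance

def pvDiffWitness_prior_months_py : Int × Int × Int := (2024, 0, 1)
def pvDiffWitnessOut_prior_months_py : (List (Int × Int)) × (List (Int × Int)) := ([(2023, 12)], [(2023, 11)])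

-- ===== CLAIM (what is proved, stated in full; the proofs are below) =====
def Claim_unchanged_prior_months_py : Prop := ∀ (year : Int) (month : Int) (count : Int), Dom_prior_months_py year month count → Pre_prior_months_py year month count → Spec_prior_months_py year month count (prior_months_py year month count)
def Claim_changed_prior_months_py : Prop := Dom_prior_months_py (pvDiffWitness_prior_months_py.1) (pvDiffWitness_prior_months_py.2.1) (pvDiffWitness_prior_months_py.2.2) ∧ Pre_prior_months_py (pvDiffWitness_prior_months_py.1) (pvDiffWitness_prior_months_py.2.1) (pvDiffWitness_prior_months_py.2.2) ∧ D_prior_months_py (pvDiffWitness_prior_months_py.1) (pvDiffWitness_prior_months_py.2.1) (pvDiffWitness_prior_months_py.2.2) ∧ prior_months_py (pvDiffWitness_prior_months_py.1) (pvDiffWitness_prior_months_py.2.1) (pvDiffWitness_prior_months_py.2.2) = pvDiffWitnessOut_prior_months_py.1 ∧ prior_months_py_alt (pvDiffWitness_prior_months_py.1) (pvDiffWitness_prior_months_py.2.1) (pvDiffWitness_prior_months_py.2.2) = pvDiffWitnessOut_prior_months_py.2 ∧ pvDiffWitnessOut_prior_months_py.1 ≠ pvDiffWitnessOut_prior_m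onths_py.2
def Claim_exact_prior_months_py : Prop := ∀ (year : Int) (month : Int) (count : Int), Dom_prior_months_py year month count → Pre_prior_months_py year month count → D_prior_months_py year month count → prior_months_py year month count ≠ prior_months_py_alt year month count

-- ===== LEMMAS AND PROOFS =====

/-- One prior-month entry as a function of the linearised month index `t`. -/
def pvStep (t : Int) : Int × Int := (PySem.Int.floordiv t 12, PySem.Int.mod t 12 + 1)

theorem pvStep_spec (y m : Int) (h1 : 1 ≤ m) (h2 : m ≤ 12) :
    pvStep (y * 12 + m - 1) = (y, m) := by
  have hd : PySem.Int.floordiv (y * 12 + m - 1) 12 = y := by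
    rw [PySem.Int.floordiv_eq_iff_of_pos (by norm_num)]
    omega
  have hm := PySem.Int.floordiv_mul_add_mod (y * 12 + m - 1) 12
  rw [hd] at hm
  simp [pvStep]
  omega

theorem pvFoldl_append {α β : Type} (f : α → β) :
    ∀ (l : List α) (acc : List β),
      l.foldl (fun out i => out ++ [f i]) acc = acc ++ l.map f := by
  intro l
  induction l with
  | nil => simp
  | cons x xs ih => intro acc; simp [List.foldl, ih]

theorem pvLoopA_eq (n : Nat) :
    ∀ (y m : Int), 1 ≤ m → m ≤ 13 → ∀ (acc : List (Int × Int)),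
      priorMonthsLoopA n y m acc
        = acc ++ (List.range n).map (fun (k : Nat) => pvStep (y * 12 + m - 2 - (k : Int))) := by
  induction n with
  | zero => intro y m _ _ acc; simp [priorMonthsLoopA]
  | succ n ih =>
    intro y m h1 h2 acc
    rw [List.range_succ_eq_map]
    by_cases hm : m - 1 < 1
    · have hm1 : m = 1 := by omega
      simp only [priorMonthsLoopA, if_pos hm]
      rw [ih (y - 1) 12 (by norm_num) (by norm_num)]
      subst hm1
      have hhead : pvStep (y * 12 + 1 - 2 - (0 : Int)) = (y - 1, 12) := by
        have := pvStep_spec (y - 1) 12 (by norm_num) (by norm_num)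
        rw [show y * 12 + 1 - 2 - (0 : Int) = (y - 1) * 12 + 12 - 1 by ring]
        exact this
      simp only [List.map_cons, List.append_assoc, List.singleton_append, Nat.cast_zero]
      rw [hhead]
      congr 1
      rw [List.map_map]
      congr 1
      apply List.map_congr_left
      intro k _
      simp only [Function.comp]
      congr 1
      push_cast
      ring
    · simp only [priorMonthsLoopA, if_neg hm]
      rw [ih y (m - 1) (by omega) (by omega)]
      have hhead : pvStep (y * 12 + m - 2 - (0 : Int)) = (y, m - 1) := by
        have := pvStep_spec y (m - 1) (by omega) (by omega)
        rw [show y * 12 + m - 2 - (0 : Int) = y * 12 + (m - 1) - 1 by ring]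
        exact this
      simp only [List.map_cons, List.append_assoc, List.singleton_append, Nat.cast_zero]
      rw [hhead]
      congr 1
      rw [List.map_map]
      congr 1
      apply List.map_congr_left
      intro k _
      simp only [Function.comp]
      congr 1
      push_cast
      ring

theorem pvAlt_map (y m c : Int) :
    prior_months_py_alt y m c
      = (PySem.List.pyRange 1 (c + 1) 1).map (fun i => pvStep (y * 12 + m - 1 - i)) := by
  show (PySem.List.pyRange 1 (c + 1) 1).foldl
      (fun out i => out ++ [(PySem.Int.floordiv (y * 12 + m - 1 - i) 12,
                             PySem.Int.mod (y * 12 + m - 1 - i) 12 + 1)]) [] = _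
  rw [pvFoldl_append (fun i => (PySem.Int.floordiv (y * 12 + m - 1 - i) 12,
                                PySem.Int.mod (y * 12 + m - 1 - i) 12 + 1))]
  simp [pvStep]

theorem pvMain (y m c : Int) (h1 : 1 ≤ m) (h2 : m ≤ 13) :
    priorMonthsLoopA c.toNat y m [] = prior_months_py_alt y m c := by
  rw [pvAlt_map, pvLoopA_eq c.toNat y m h1 h2 []]
  rw [PySem.List.pyRange_one]
  simp only [List.nil_append, List.map_map, add_sub_cancel_right]
  apply List.map_congr_left
  intro k _
  simp only [Function.comp]
  congr 1
  ring

-- ===== VERDICT (by name: the statement is the Claim_ definition above) =====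
theorem prior_months_py_spec : Claim_unchanged_prior_months_py := by
  intro year month count _ hpre hnd
  show prior_months_py year month count = prior_months_py_alt year month count
  unfold prior_months_py
  by_cases hm1 : 1 ≤ month
  · exact pvMain year month count hm1 hpre
  · have hc : count < 1 := by
      by_contra h
      exact hnd ⟨by omega, by omega⟩
    have h0 : count.toNat = 0 := by omega
    rw [h0, pvAlt_map, PySem.List.pyRange_one_eq_nil (by omega)]
    rfl

theorem prior_months_py_changed : Claim_changed_prior_months_py := by
  unfold Claim_changed_prior_months_py; decide

theorem prior_months_py_tight : Claim_exact_prior_months_py := by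
  intro year month count _ _ hd heq
  obtain ⟨hm, hc⟩ := hd
  -- A's first pair is (year-1, 12)
  obtain ⟨n, hn⟩ : ∃ n : Nat, count.toNat = n + 1 := ⟨count.toNat - 1, by omega⟩
  have hA : prior_months_py year month count
      = (year - 1, 12) :: (List.range n).map (fun (k : Nat) => pvStep ((year - 1) * 12 + 12 - 2 - (k : Int))) := by
    unfold prior_months_py
    rw [hn]
    simp only [priorMonthsLoopA, if_pos (show month - 1 < 1 by omega)]
    rw [pvLoopA_eq n (year - 1) 12 (by norm_num) (by norm_num)]
    rfl
  have hB : prior_months_py_alt year month count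
      = pvStep (year * 12 + month - 2)
        :: (PySem.List.pyRange 2 (count + 1) 1).map (fun i => pvStep (year * 12 + month - 1 - i)) := by
    rw [pvAlt_map, PySem.List.pyRange_one_cons (by omega)]
    simp only [List.map_cons]
    norm_num
    rw [show year * 12 + month - 1 - 1 = year * 12 + month - 2 by ring]
  rw [hA, hB] at heq
  have hhead : (year - 1, 12) = pvStep (year * 12 + month - 2) := (List.cons.injEq _ _ _ _).mp heq |>.1
  have hdiv : PySem.Int.floordiv (year * 12 + month - 2) 12 = year - 1 := by
    have := congrArg Prod.fst hhead; simpa [pvStep] using this.symm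
  have hmod : PySem.Int.mod (year * 12 + month - 2) 12 + 1 = 12 := by
    have := congrArg Prod.snd hhead; simpa [pvStep] using this.symm
  have hfm := PySem.Int.floordiv_mul_add_mod (year * 12 + month - 2) 12
  rw [hdiv] at hfm
  omega
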